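-- pv_equiv track=rewrite | github.com/lymchgmk/Algorithm-Problem-Solving | Programmers/연습문제/Level 3/2 x n 타일링.py | solution
-- ===== SOURCE A (Python) =====
-- def solution(N):
--     SIZE = 2
--     ZERO = [[1, 0], [0, 1]]
--     BASE = [[1, 1], [1, 0]]
--
--     # 두 행렬의 곱을 구함, O(log2 N)
--     def square_matrix_mul(a, b, size=SIZE):
--         new = [[0 for _ in range(size)] for _ in range(size)]
--         for i in range(size):
--             for j in range(size):
--                 for k in range(size):
--                     new[i][j] += (a[i][k] * b[k][j]) % 1000000007
--         return new
--
--     # 기본 행렬을 N번 곱한 행렬을 만든다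
--     def get_nth(N):
--         matrix = ZERO.copy()
--         k = 0
--         tmp = BASE.copy()
--
--         while 2 ** k <= N:
--             if N & (1 << k) != 0:
--                 matrix = square_matrix_mul(matrix, tmp)
--             k += 1
--             tmp = square_matrix_mul(tmp, tmp)
--
--         return matrix
--
--     return get_nth(N + 1)[1][0] % 1000000007
-- ===== SOURCE B (Python) =====
-- def solution(N):
--     MOD = 1000000007
--     if N + 1 <= 0:
--         return 0
--
--     # fast doubling on the pair (F(n), F(n+1)), all values kept mod MOD
--     def fd(n):
--         if n == 0:
--             return (0, 1)
--         a, b = fd(n >> 1)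
--         c = a * ((2 * b - a) % MOD) % MOD
--         d = (a * a + b * b) % MOD
--         if n & 1:
--             return (d, (c + d) % MOD)
--         return (c, d)
--
--     return fd(N + 1)[0] % MOD
-- ===== Notes on version B (the rewrite author's own statement) =====
-- stated objective: alternative
-- what changed: Replaced the 2x2-matrix binary exponentiation (bit-scan loop with matrix squaring) by a fast-doubling recursion on the pair (F(n), F(n+1)) mod 1000000007.
import Mathlib
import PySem

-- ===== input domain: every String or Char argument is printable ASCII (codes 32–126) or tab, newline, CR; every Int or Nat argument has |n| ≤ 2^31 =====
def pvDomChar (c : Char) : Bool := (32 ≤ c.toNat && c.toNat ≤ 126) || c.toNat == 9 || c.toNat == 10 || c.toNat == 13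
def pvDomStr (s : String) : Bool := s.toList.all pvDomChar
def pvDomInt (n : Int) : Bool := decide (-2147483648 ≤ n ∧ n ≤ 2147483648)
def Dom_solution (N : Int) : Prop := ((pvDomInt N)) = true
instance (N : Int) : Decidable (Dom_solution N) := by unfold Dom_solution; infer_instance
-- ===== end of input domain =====

-- B replaces the 2x2-matrix binary exponentiation for F(N+1) mod 1e9+7 by a fast-doubling recursion on the pair (F(n), F(n+1)) (alternative algorithm, same O(log N) cost).

-- ===== PORT A =====
-- square_matrix_mul: new = [[0]*2]*2 built by comprehensions; triple nested loop accumulating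
-- new[i][j] += (a[i][k]*b[k][j]) % 1000000007  (indices are always in range here)
def solMul (a b : List (List Int)) : List (List Int) :=
  let size : Int := 2
  let new0 := (PySem.List.pyRange 0 size 1).map (fun _ => (PySem.List.pyRange 0 size 1).map (fun _ => (0 : Int)))
  (PySem.List.pyRange 0 size 1).foldl (fun new i =>
    (PySem.List.pyRange 0 size 1).foldl (fun new j =>
      (PySem.List.pyRange 0 size 1).foldl (fun new k =>
        PySem.List.pySetD new i (PySem.List.pySetD (PySem.List.pyGetD new i []) j
          (PySem.List.pyGetD (PySem.List.pyGetD new i []) j 0 +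
            PySem.Int.mod (PySem.List.pyGetD (PySem.List.pyGetD a i []) k 0 *
                           PySem.List.pyGetD (PySem.List.pyGetD b k []) j 0) 1000000007))) new) new) new0

-- the while-loop of get_nth; the counter k (0,1,2,…) is carried as a Nat, 2 ** k is (2:Int)^k
-- and 1 << k is (1:Int) <<< k, exactly Python's values for k ≥ 0
def solLoop (N : Int) (matrix : List (List Int)) (k : Nat) (tmp : List (List Int)) : List (List Int) :=
  if h : (2 : Int) ^ k ≤ N then
    let matrix' := if PySem.Int.band N ((1 : Int) <<< k) ≠ 0 then solMul matrix tmp else matrix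
    solLoop N matrix' (k + 1) (solMul tmp tmp)
  else matrix
termination_by N.toNat + 1 - k
decreasing_by
  have hk : (k : Int) < 2 ^ k := by exact_mod_cast Nat.lt_two_pow_self
  have : (k : Int) < N := lt_of_lt_of_le hk h
  omega

def solution (N : Int) : Int :=
  PySem.Int.mod
    (PySem.List.pyGetD (PySem.List.pyGetD (solLoop (N + 1) [[1, 0], [0, 1]] 0 [[1, 1], [1, 0]]) 1 []) 0 0)
    1000000007

-- ===== PORT B =====
-- fd: fast doubling on the pair (F(n), F(n+1)); the Python base test 'n == 0' is written
-- 'n ≤ 0' (the same test on every call fd actually receives, which all have n ≥ 0) so that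
-- the recursion on n >> 1 is structurally decreasing
def fdp (n : Int) : Int × Int :=
  if n ≤ 0 then (0, 1)
  else
    let p := fdp (n >>> (1 : Nat))
    let a := p.1
    let b := p.2
    let c := PySem.Int.mod (a * PySem.Int.mod (2 * b - a) 1000000007) 1000000007
    let d := PySem.Int.mod (a * a + b * b) 1000000007
    if PySem.Int.band n 1 ≠ 0 then (d, PySem.Int.mod (c + d) 1000000007) else (c, d)
termination_by n.toNat
decreasing_by
  rename_i h
  have h2 : n >>> (1 : Nat) = n / 2 ^ 1 := Int.shiftRight_eq_div_pow n 1
  have h3 : (2 : Int) ^ 1 = 2 := by norm_num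
  rw [h3] at h2
  omega

def solution_alt (N : Int) : Int :=
  if N + 1 ≤ 0 then 0
  else PySem.Int.mod (fdp (N + 1)).1 1000000007

-- ===== PRECONDITION & SPEC =====
def Spec_solution (N : Int) (out : Int) : Prop := out = solution_alt N
instance (N : Int) (out : Int) : Decidable (Spec_solution N out) := by unfold Spec_solution; infer_instance

-- ===== CLAIM (what is proved, stated in full; the proofs are below) =====
def Claim_equal_solution : Prop := ∀ (N : Int), Dom_solution N → Spec_solution N (solution N)

-- ===== LEMMAS AND PROOFS =====

def fibI : Nat → Int
  | 0 => 0
  | 1 => 1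
  | n + 2 => fibI n + fibI (n + 1)

structure Mat2 where
  a : Int
  b : Int
  c : Int
  d : Int
deriving DecidableEq, Repr

def matMul (P Q : Mat2) : Mat2 :=
  ⟨P.a * Q.a + P.b * Q.c, P.a * Q.b + P.b * Q.d, P.c * Q.a + P.d * Q.c, P.c * Q.b + P.d * Q.d⟩

def matPow (Q : Mat2) : Nat → Mat2
  | 0 => ⟨1, 0, 0, 1⟩
  | n + 1 => matMul Q (matPow Q n)

lemma pv_pr2 : PySem.List.pyRange 0 2 1 = [0, 1] := rfl
lemma pv_g0 {α : Type} (r0 r1 : α) (d : α) : PySem.List.pyGetD [r0, r1] 0 d = r0 := rfl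
lemma pv_g1 {α : Type} (r0 r1 : α) (d : α) : PySem.List.pyGetD [r0, r1] 1 d = r1 := rfl
lemma pv_s0 {α : Type} (r0 r1 v : α) : PySem.List.pySetD [r0, r1] 0 v = [v, r1] := rfl
lemma pv_s1 {α : Type} (r0 r1 v : α) : PySem.List.pySetD [r0, r1] 1 v = [r0, v] := rfl

-- the congruence invariant tying A's (unreduced) matrices to the exact matrix
def pvRep (m : List (List Int)) (P : Mat2) : Prop :=
  ∃ x y z w, m = [[x, y], [z, w]] ∧ x % 1000000007 = P.a % 1000000007 ∧ y % 1000000007 = P.b % 1000000007 ∧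
    z % 1000000007 = P.c % 1000000007 ∧ w % 1000000007 = P.d % 1000000007

lemma solMul_eval (x y z w e f g h : Int) :
    solMul [[x, y], [z, w]] [[e, f], [g, h]] =
      [[x * e % 1000000007 + y * g % 1000000007, x * f % 1000000007 + y * h % 1000000007],
       [z * e % 1000000007 + w * g % 1000000007, z * f % 1000000007 + w * h % 1000000007]] := by
  have hm : ∀ u : Int, PySem.Int.mod u 1000000007 = u % 1000000007 := fun u =>
    PySem.Int.mod_eq_emod_of_pos (by norm_num)
  simp only [solMul, pv_pr2, List.map_cons, List.map_nil, List.foldl_cons, List.foldl_nil,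
    pv_g0, pv_g1, pv_s0, pv_s1, zero_add, hm]

lemma addmul_cong {M x e y g x' e' y' g' : Int} (hx : x % M = x' % M) (he : e % M = e' % M)
    (hy : y % M = y' % M) (hg : g % M = g' % M) :
    (x * e % M + y * g % M) % M = (x' * e' + y' * g') % M := by
  rw [Int.add_emod, Int.emod_emod_of_dvd _ dvd_rfl, Int.emod_emod_of_dvd _ dvd_rfl,
    Int.mul_emod x e, Int.mul_emod y g, hx, he, hy, hg, ← Int.mul_emod, ← Int.mul_emod,
    ← Int.add_emod]

lemma rep_mul {m₁ m₂ : List (List Int)} {P Q : Mat2} (h₁ : pvRep m₁ P) (h₂ : pvRep m₂ Q) :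
    pvRep (solMul m₁ m₂) (matMul P Q) := by
  obtain ⟨x, y, z, w, rfl, hx, hy, hz, hw⟩ := h₁
  obtain ⟨e, f, g, h, rfl, he, hf, hg, hh⟩ := h₂
  refine ⟨_, _, _, _, solMul_eval x y z w e f g h, ?_, ?_, ?_, ?_⟩ <;> simp only [matMul]
  · exact addmul_cong hx he hy hg
  · exact addmul_cong hx hf hy hh
  · exact addmul_cong hz he hw hg
  · exact addmul_cong hz hf hw hh

lemma matMul_assoc (P Q R : Mat2) : matMul (matMul P Q) R = matMul P (matMul Q R) := by
  simp only [matMul, Mat2.mk.injEq]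
  refine ⟨by ring, by ring, by ring, by ring⟩

lemma matMul_one (P : Mat2) : matMul P ⟨1, 0, 0, 1⟩ = P := by
  simp [matMul]

lemma matMul_id (P : Mat2) : matMul ⟨1, 0, 0, 1⟩ P = P := by
  simp [matMul]

lemma matPow_sq (Q : Mat2) (n : Nat) : matPow (matMul Q Q) n = matPow Q (2 * n) := by
  induction n with
  | zero => rfl
  | succ n ih =>
    have : 2 * (n + 1) = (2 * n + 1) + 1 := by omega
    rw [this, matPow, matPow, matPow, ih, ← matMul_assoc]

lemma pv_one_shift (k : Nat) : (1 : Int) <<< k = ((1 <<< k : Nat) : Int) :=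
  Int.mem_toNat?.mp rfl

lemma pv_band_iff (M : Int) (hM : 0 ≤ M) (k : Nat) :
    (PySem.Int.band M ((1 : Int) <<< k) ≠ 0) ↔ M.toNat.testBit k := by
  conv_lhs => rw [← Int.toNat_of_nonneg hM, pv_one_shift k, PySem.Int.band_natCast]
  rw [Nat.one_shiftLeft, Nat.and_two_pow]
  cases hb : M.toNat.testBit k
  · simp
  · simp only [Bool.toNat_true, one_mul, ne_eq, iff_true]
    exact_mod_cast pow_ne_zero k (two_ne_zero)

lemma pv_shift_split (a k : Nat) :
    a >>> k = 2 * (a >>> (k + 1)) + (if a.testBit k then 1 else 0) := by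
  rw [Nat.shiftRight_eq_div_pow, Nat.shiftRight_eq_div_pow,
    Nat.testBit_eq_decide_div_mod_eq, pow_succ, ← Nat.div_div_eq_div_mul]
  rcases Nat.mod_two_eq_zero_or_one (a / 2 ^ k) with h2 | h2 <;> simp [h2] <;> omega

set_option maxHeartbeats 1000000 in
lemma solLoop_spec (M : Int) (hM : 0 ≤ M) :
    ∀ (d k : Nat) (mat tmp : List (List Int)) (P Q : Mat2), M < 2 ^ (k + d) →
      pvRep mat P → pvRep tmp Q →
      pvRep (solLoop M mat k tmp) (matMul P (matPow Q (M.toNat >>> k))) := by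
  intro d
  induction d with
  | zero =>
    intro k mat tmp P Q hlt hmat htmp
    have hklt : M.toNat < 2 ^ k := by
      have : ((M.toNat : Int)) < ((2 ^ k : Nat) : Int) := by
        rw [Int.toNat_of_nonneg hM]; push_cast; simpa using hlt
      exact_mod_cast this
    have hne : ¬ (2 : Int) ^ k ≤ M := not_le.mpr (by simpa using hlt)
    rw [solLoop, dif_neg hne]
    rw [Nat.shiftRight_eq_div_pow, Nat.div_eq_of_lt hklt]
    simpa [matPow, matMul_one] using hmat
  | succ d ih =>
    intro k mat tmp P Q hlt hmat htmp
    by_cases hc : (2 : Int) ^ k ≤ M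
    · rw [solLoop, dif_pos hc]
      have hlt' : M < 2 ^ ((k + 1) + d) := by
        have : (k + 1) + d = k + (d + 1) := by omega
        rw [this]; exact hlt
      have hbit := pv_band_iff M hM k
      have hsplit := pv_shift_split M.toNat k
      by_cases hb : PySem.Int.band M ((1 : Int) <<< k) ≠ 0
      · have htb : M.toNat.testBit k := hbit.mp hb
        have hres := ih (k + 1) (solMul mat tmp) (solMul tmp tmp) (matMul P Q) (matMul Q Q) hlt'
          (rep_mul hmat htmp) (rep_mul htmp htmp)
        rw [if_pos hb, hsplit, if_pos htb]
        rw [matPow_sq] at hres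
        have hpow : matPow Q (2 * (M.toNat >>> (k + 1)) + 1) =
            matMul Q (matPow Q (2 * (M.toNat >>> (k + 1)))) := rfl
        rw [hpow, ← matMul_assoc]
        exact hres
      · have htb : ¬ M.toNat.testBit k := fun h => hb (hbit.mpr h)
        have hres := ih (k + 1) mat (solMul tmp tmp) P (matMul Q Q) hlt' hmat (rep_mul htmp htmp)
        rw [if_neg hb, hsplit, if_neg htb, Nat.add_zero]
        rw [matPow_sq] at hres
        exact hres
    · have hklt : M.toNat < 2 ^ k := by
        have h1 : M < ((2 ^ k : Nat) : Int) := by push_cast; omega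
        rw [← Int.toNat_of_nonneg hM] at h1; exact_mod_cast h1
      rw [solLoop, dif_neg hc]
      rw [Nat.shiftRight_eq_div_pow, Nat.div_eq_of_lt hklt]
      simpa [matPow, matMul_one] using hmat

lemma matPow_base (m : Nat) :
    matPow ⟨1, 1, 1, 0⟩ m = ⟨fibI (m + 1), fibI m, fibI m, fibI (m + 1) - fibI m⟩ := by
  induction m with
  | zero => rfl
  | succ m ih =>
    rw [matPow, ih]
    simp only [matMul, Mat2.mk.injEq, fibI]
    refine ⟨by ring, by ring, by ring, by ring⟩

lemma pv_shr (m k : Nat) : (m : Int) >>> k = ((m >>> k : Nat) : Int) :=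
  Int.mem_toNat?.mp rfl

lemma fibI_fib (n : Nat) : fibI n = (Nat.fib n : Int) := by
  induction n using Nat.twoStepInduction with
  | zero => rfl
  | one => rfl
  | more n ih1 ih2 =>
    show fibI n + fibI (n + 1) = _
    rw [ih1, ih2, Nat.fib_add_two]
    push_cast
    ring

lemma fibI_two_mul (k : Nat) : fibI (2 * k) = fibI k * (2 * fibI (k + 1) - fibI k) := by
  have h : Nat.fib k ≤ 2 * Nat.fib (k + 1) := by
    have := Nat.fib_le_fib_succ (n := k); omega
  rw [fibI_fib, fibI_fib, fibI_fib, Nat.fib_two_mul, Nat.cast_mul, Nat.cast_sub h]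
  push_cast
  ring

lemma fibI_two_mul_add_one (k : Nat) : fibI (2 * k + 1) = fibI (k + 1) ^ 2 + fibI k ^ 2 := by
  rw [fibI_fib, fibI_fib, fibI_fib, Nat.fib_two_mul_add_one]
  push_cast
  ring

lemma pv_key (x : Int) : x % 1000000007 ≡ x [ZMOD 1000000007] :=
  Int.emod_emod_of_dvd _ dvd_rfl

set_option maxHeartbeats 1000000 in
lemma fdp_spec : ∀ (t : Nat) (n : Int), 0 ≤ n → n.toNat = t →
    fdp n = (fibI t % 1000000007, fibI (t + 1) % 1000000007) := by
  intro t
  induction t using Nat.strong_induction_on with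
  | _ t ih =>
    intro n hn ht
    by_cases h0 : n ≤ 0
    · have ht0 : t = 0 := by omega
      subst ht0
      rw [fdp.eq_def, if_pos h0]
      decide
    · rw [fdp.eq_def, if_neg h0]
      have htpos : 0 < t := by omega
      have hhalf : n >>> (1 : Nat) = ((t / 2 : Nat) : Int) := by
        conv_lhs => rw [← Int.toNat_of_nonneg hn, ht, pv_shr]
        rw [Nat.shiftRight_eq_div_pow]
      have hrec := ih (t / 2) (by omega) ((t / 2 : Nat) : Int) (by positivity)
        (Int.toNat_natCast _)
      rw [hhalf, hrec]
      have hband : (PySem.Int.band n 1 ≠ 0) ↔ t % 2 = 1 := by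
        conv_lhs => rw [← Int.toNat_of_nonneg hn, ht,
          show (1 : Int) = ((1 : Nat) : Int) from rfl, PySem.Int.band_natCast,
          Nat.and_one_is_mod]
        simp
        omega
      have hmod : ∀ u : Int, PySem.Int.mod u 1000000007 = u % 1000000007 := fun u =>
        PySem.Int.mod_eq_emod_of_pos (by norm_num)
      set F1 := fibI (t / 2) with hF1
      set F2 := fibI (t / 2 + 1) with hF2
      have hc : PySem.Int.mod ((F1 % 1000000007) *
          PySem.Int.mod (2 * (F2 % 1000000007) - F1 % 1000000007) 1000000007) 1000000007 =
          fibI (2 * (t / 2)) % 1000000007 := by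
        rw [hmod, hmod, fibI_two_mul, ← hF1, ← hF2]
        exact ((pv_key F1).mul (((pv_key _).trans
          (((pv_key F2).mul_left 2).sub (pv_key F1)))))
      have hd : PySem.Int.mod ((F1 % 1000000007) * (F1 % 1000000007) +
          (F2 % 1000000007) * (F2 % 1000000007)) 1000000007 =
          fibI (2 * (t / 2) + 1) % 1000000007 := by
        rw [hmod, fibI_two_mul_add_one, ← hF1, ← hF2,
          show F2 ^ 2 + F1 ^ 2 = F1 * F1 + F2 * F2 by ring]
        exact ((pv_key F1).mul (pv_key F1)).add ((pv_key F2).mul (pv_key F2))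
      show (if PySem.Int.band n 1 ≠ 0 then _ else _) = _
      by_cases hb : PySem.Int.band n 1 ≠ 0
      · rw [if_pos hb]
        have hodd : t = 2 * (t / 2) + 1 := by have := hband.mp hb; omega
        have hsum : PySem.Int.mod
            (fibI (2 * (t / 2)) % 1000000007 + fibI (2 * (t / 2) + 1) % 1000000007)
            1000000007 = fibI (2 * (t / 2) + 1 + 1) % 1000000007 := by
          rw [hmod, show fibI (2 * (t / 2) + 1 + 1) = fibI (2 * (t / 2)) + fibI (2 * (t / 2) + 1)
            from rfl]
          exact (pv_key _).add (pv_key _)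
        rw [hc, hd, hsum]
        conv_rhs => rw [hodd]
      · rw [if_neg hb]
        have heven : t = 2 * (t / 2) := by
          have := hband; omega
        rw [hc, hd]
        conv_rhs => rw [heven]

-- ===== VERDICT (by name: the statement is the Claim_ definition above) =====
theorem solution_spec : Claim_equal_solution := by
  intro N hdom
  unfold Spec_solution
  by_cases h0 : N + 1 ≤ 0
  · have hne : ¬ (2 : Int) ^ (0 : Nat) ≤ N + 1 := by norm_num; omega
    unfold solution solution_alt
    rw [if_pos h0, solLoop, dif_neg hne, pv_g1, pv_g0,
      PySem.Int.mod_eq_emod_of_pos (by norm_num)]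
    exact Int.zero_emod _
  · have hdm : N ≤ 2147483648 := by
      unfold Dom_solution pvDomInt at hdom
      simp only [decide_eq_true_eq] at hdom
      omega
    have hMlt : N + 1 < 2 ^ ((0 : Nat) + 32) := by norm_num; omega
    have hrep := solLoop_spec (N + 1) (by omega) 32 0 [[1, 0], [0, 1]] [[1, 1], [1, 0]]
      ⟨1, 0, 0, 1⟩ ⟨1, 1, 1, 0⟩ hMlt ⟨1, 0, 0, 1, rfl, rfl, rfl, rfl, rfl⟩
      ⟨1, 1, 1, 0, rfl, rfl, rfl, rfl, rfl⟩
    rw [Nat.shiftRight_zero, matMul_id, matPow_base] at hrep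
    obtain ⟨x, y, z, w, hm, hx, hy, hz, hw⟩ := hrep
    unfold solution
    rw [hm, pv_g1, pv_g0, PySem.Int.mod_eq_emod_of_pos (by norm_num), hz]
    unfold solution_alt
    rw [if_neg h0, fdp_spec (N + 1).toNat (N + 1) (by omega) rfl]
    show _ = PySem.Int.mod (fibI ((N + 1).toNat) % 1000000007) 1000000007
    rw [PySem.Int.mod_eq_emod_of_pos (by norm_num), Int.emod_emod_of_dvd _ dvd_rfl]
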